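-- pv_equiv track=rewrite | github.com/djbowles/seaman-reborn | src/seaman_brain/api/streaming.py | diff_to_channels
-- ===== SOURCE A (Python) =====
-- from enum import StrEnum
--
-- class EventChannel(StrEnum):
--     """Subscribable event channels for real-time streaming."""
--
--     MOOD = "mood"
--     NEEDS = "needs"
--     EVOLUTION = "evolution"
--     BEHAVIOR = "behavior"
--     TANK = "tank"
--     DEATH = "death"
--
-- def diff_to_channels(changed_fields: list[str]) -> set[str]:
--     """Map a list of changed dot-paths to the relevant :class:`EventChannel` names.
--
--     Mapping rules
--     ~~~~~~~~~~~~~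
--     - ``creature_state.mood`` or ``mood`` → ``mood``
--     - ``needs.*`` → ``needs``
--     - ``tank.*`` → ``tank``
--     - ``creature_state.stage`` or ``current_stage`` → ``evolution``
--     - ``active_traits.*`` → ``mood`` (traits affect mood rendering)
--     - Other ``creature_state.*`` → ``needs`` (hunger, health, comfort, etc.)
--     """
--     channels: set[str] = set()
--     for path in changed_fields:
--         if path in ("mood", "creature_state.mood"):
--             channels.add(EventChannel.MOOD)
--         elif path.startswith("needs.") or path == "needs":
--             channels.add(EventChannel.NEEDS)
--         elif path.startswith("tank.") or path == "tank":
--             channels.add(EventChannel.TANK)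
--         elif path in ("current_stage", "creature_state.stage"):
--             channels.add(EventChannel.EVOLUTION)
--         elif path.startswith("active_traits."):
--             channels.add(EventChannel.MOOD)
--         elif path.startswith("creature_state."):
--             channels.add(EventChannel.NEEDS)
--     return channels
-- ===== SOURCE B (Python) =====
-- def diff_to_channels(changed_fields: list[str]) -> set[str]:
--     """Segment-based classifier: split each path at its first dot and
--     dispatch on the (head, tail) segments instead of whole-string tests."""
--     channels: set[str] = set()
--     for path in changed_fields:
--         head, dot, tail = path.partition(".")
--         channel = None
--         if head == "needs":
--             channel = "needs"
--         elif head == "tank":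
--             channel = "tank"
--         elif head == "creature_state" and dot:
--             if tail == "mood":
--                 channel = "mood"
--             elif tail == "stage":
--                 channel = "evolution"
--             else:
--                 channel = "needs"
--         elif head == "active_traits" and dot:
--             channel = "mood"
--         elif not dot and head == "mood":
--             channel = "mood"
--         elif not dot and head == "current_stage":
--             channel = "evolution"
--         if channel is not None:
--             channels.add(channel)
--     return channels
-- ===== Notes on version B (the rewrite author's own statement) =====
-- stated objective: alternative
-- what changed: B parses each path into (head, dot, tail) segments with one str.partition('.') call and classifies by dispatching on the segments, instead of A's if/elif chain of whole-string exact-equality and startswith prefix tests.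
import Mathlib
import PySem

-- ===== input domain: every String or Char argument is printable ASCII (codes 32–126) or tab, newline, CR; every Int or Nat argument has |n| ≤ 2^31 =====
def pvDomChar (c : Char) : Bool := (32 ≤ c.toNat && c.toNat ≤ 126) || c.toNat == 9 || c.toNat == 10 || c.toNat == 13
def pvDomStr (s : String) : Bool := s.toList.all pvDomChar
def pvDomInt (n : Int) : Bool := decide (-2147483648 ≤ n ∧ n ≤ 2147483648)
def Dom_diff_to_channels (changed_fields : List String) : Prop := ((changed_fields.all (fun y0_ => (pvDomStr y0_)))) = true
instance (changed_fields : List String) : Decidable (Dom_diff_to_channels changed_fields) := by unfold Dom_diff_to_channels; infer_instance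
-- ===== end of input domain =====

-- B replaces A's whole-string exact/prefix if-chain by a segment parser: each path is split at its first dot and classified by dispatching on the (head, tail) segments; alternative decomposition, same cost.


-- ===== PORT A =====
def diff_to_channels (changed_fields : List String) : List String :=
  changed_fields.foldl (fun channels path =>
    if path == "mood" || path == "creature_state.mood" then
      PySem.Set.add channels "mood"
    else if PySem.Str.startswith path "needs." || path == "needs" then
      PySem.Set.add channels "needs"
    else if PySem.Str.startswith path "tank." || path == "tank" then
      PySem.Set.add channels "tank"
    else if path == "current_stage" || path == "creature_state.stage" then
      PySem.Set.add channels "evolution"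
    else if PySem.Str.startswith path "active_traits." then
      PySem.Set.add channels "mood"
    else if PySem.Str.startswith path "creature_state." then
      PySem.Set.add channels "needs"
    else channels) PySem.Set.empty

-- ===== PORT B =====
-- path.partition("."): (head, sep-found?, tail) — hand port over List Char, exact
-- (the Bool is Python's truthiness test 'if dot:' on the separator component)
def pvPart : List Char → List Char × Bool × List Char
  | [] => ([], false, [])
  | c :: cs =>
    if c = '.' then ([], true, cs)
    else
      let r := pvPart cs
      (c :: r.1, r.2.1, r.2.2)

-- the body of Source B's loop: classify one path from its (head, dot, tail) segments
def pvClassify (path : String) : Option String :=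
  let r := pvPart path.toList
  let h := r.1
  let d := r.2.1
  let t := r.2.2
  if h = "needs".toList then some "needs"
  else if h = "tank".toList then some "tank"
  else if h = "creature_state".toList ∧ d = true then
    if t = "mood".toList then some "mood"
    else if t = "stage".toList then some "evolution"
    else some "needs"
  else if h = "active_traits".toList ∧ d = true then some "mood"
  else if d = false ∧ h = "mood".toList then some "mood"
  else if d = false ∧ h = "current_stage".toList then some "evolution"
  else none

def diff_to_channels_alt (changed_fields : List String) : List String :=
  changed_fields.foldl (fun channels path =>
    match pvClassify path with
    | some c => PySem.Set.add channels c
    | none => channels) PySem.Set.empty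

-- ===== PRECONDITION & SPEC =====
def Spec_diff_to_channels (changed_fields : List String) (out : List String) : Prop := out = diff_to_channels_alt changed_fields
instance (changed_fields : List String) (out : List String) : Decidable (Spec_diff_to_channels changed_fields out) := by unfold Spec_diff_to_channels; infer_instance

-- ===== CLAIM (what is proved, stated in full; the proofs are below) =====
def Claim_equal_diff_to_channels : Prop := ∀ (changed_fields : List String), Dom_diff_to_channels changed_fields → Spec_diff_to_channels changed_fields (diff_to_channels changed_fields)

-- ===== LEMMAS AND PROOFS =====

-- partition of a dot-free list
lemma pvPart_no_dot (w : List Char) (hw : '.' ∉ w) : pvPart w = (w, false, []) := by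
  induction w with
  | nil => rfl
  | cons c cs ih =>
    have hc : c ≠ '.' := fun h => hw (h ▸ List.mem_cons_self)
    have hcs : '.' ∉ cs := fun h => hw (List.mem_cons_of_mem _ h)
    simp [pvPart, hc, ih hcs]

-- partition of a list whose first dot splits it as w ++ '.' :: t
lemma pvPart_dot (w t : List Char) (hw : '.' ∉ w) : pvPart (w ++ '.' :: t) = (w, true, t) := by
  induction w with
  | nil => simp [pvPart]
  | cons c cs ih =>
    have hc : c ≠ '.' := fun h => hw (h ▸ List.mem_cons_self)
    have hcs : '.' ∉ cs := fun h => hw (List.mem_cons_of_mem _ h)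
    simp [pvPart, hc, ih hcs]

-- every list is recomposed from its partition, and the head is dot-free
lemma pvPart_sound (l : List Char) :
    l = (pvPart l).1 ++ (if (pvPart l).2.1 then '.' :: (pvPart l).2.2 else []) ∧
      '.' ∉ (pvPart l).1 := by
  induction l with
  | nil => simp [pvPart]
  | cons c cs ih =>
    by_cases hc : c = '.'
    · subst hc; simp [pvPart]
    · simp only [pvPart, if_neg hc]
      refine ⟨?_, ?_⟩
      · conv_lhs => rw [ih.1]
        cases (pvPart cs).2.1 <;> simp
      · intro hmem
        rcases List.mem_cons.mp hmem with h | h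
        · exact hc h.symm
        · exact ih.2 h

lemma eq_nodot_iff (h w : List Char) (hh : '.' ∉ h) (hw : '.' ∉ w) (t : List Char) :
    (h ++ '.' :: t = w) ↔ False := by
  constructor
  · intro he
    have := congrArg pvPart he
    rw [pvPart_dot h t hh, pvPart_no_dot w hw] at this
    exact absurd (congrArg (fun p => p.2.1) this) (by simp)
  · exact False.elim

lemma eq_dotted_iff (h t w u : List Char) (hh : '.' ∉ h) (hw : '.' ∉ w) :
    (h ++ '.' :: t = w ++ '.' :: u) ↔ (h = w ∧ t = u) := by
  constructor
  · intro he
    have := congrArg pvPart he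
    rw [pvPart_dot h t hh, pvPart_dot w u hw] at this
    exact ⟨congrArg Prod.fst this, congrArg (fun p => p.2.2) this⟩
  · rintro ⟨rfl, rfl⟩; rfl

lemma prefix_dotted_iff (h t w : List Char) (hh : '.' ∉ h) (hw : '.' ∉ w) :
    (w ++ ['.'] <+: h ++ '.' :: t) ↔ h = w := by
  constructor
  · rintro ⟨r, hr⟩
    have hr' : h ++ '.' :: t = w ++ '.' :: r := by
      rw [← hr]; simp
    exact ((eq_dotted_iff h t w r hh hw).mp hr').1
  · rintro rfl
    exact ⟨t, by simp⟩

lemma prefix_nodot_false (h w : List Char) (hh : '.' ∉ h) :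
    ¬ (w ++ ['.'] <+: h) := by
  intro hp
  exact hh (hp.subset (by simp))

-- the loop bodies of the two ports agree on every path
lemma pv_step_eq (channels : List String) (path : String) :
    (if path == "mood" || path == "creature_state.mood" then
      PySem.Set.add channels "mood"
    else if PySem.Str.startswith path "needs." || path == "needs" then
      PySem.Set.add channels "needs"
    else if PySem.Str.startswith path "tank." || path == "tank" then
      PySem.Set.add channels "tank"
    else if path == "current_stage" || path == "creature_state.stage" then
      PySem.Set.add channels "evolution"
    else if PySem.Str.startswith path "active_traits." then
      PySem.Set.add channels "mood"
    else if PySem.Str.startswith path "creature_state." then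
      PySem.Set.add channels "needs"
    else channels)
    = (match pvClassify path with
       | some c => PySem.Set.add channels c
       | none => channels) := by
  obtain ⟨hdec, hnodot⟩ := pvPart_sound path.toList
  -- string tests ↔ list tests
  have hsl : ∀ (w : String), (path == w) = decide (path.toList = w.toList) := by
    intro w
    by_cases h : path = w
    · subst h; simp
    · have : path.toList ≠ w.toList := fun he => h (String.toList_inj.mp he)
      simp [h, this]
  have hsw : ∀ (w : String), PySem.Str.startswith path w = decide (w.toList <+: path.toList) := by
    intro w
    simp only [PySem.Str.startswith, PySem.Chars.startswith]
    by_cases h : w.toList <+: path.toList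
    · simp [h, List.isPrefixOf_iff_prefix]
    · simp only [h, decide_false]
      exact (Bool.eq_false_iff).mpr (fun hb => h (List.isPrefixOf_iff_prefix.mp hb))
  simp only [hsl, hsw, pvClassify]
  rcases hd : (pvPart path.toList).2.1 with _ | _
  · -- no dot in path
    rw [hd] at hdec; rw [if_neg (by decide)] at hdec
    rw [List.append_nil] at hdec
    -- every prefix test and dotted exact test is false
    have p1 : ¬ ("needs.".toList <+: path.toList) := by
      rw [hdec]; exact prefix_nodot_false _ "needs".toList hnodot
    have p2 : ¬ ("tank.".toList <+: path.toList) := by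
      rw [hdec]; exact prefix_nodot_false _ "tank".toList hnodot
    have p3 : ¬ ("active_traits.".toList <+: path.toList) := by
      rw [hdec]; exact prefix_nodot_false _ "active_traits".toList hnodot
    have p4 : ¬ ("creature_state.".toList <+: path.toList) := by
      rw [hdec]; exact prefix_nodot_false _ "creature_state".toList hnodot
    have e1 : path.toList ≠ "creature_state.mood".toList := by
      rw [hdec]; intro he
      exact hnodot (he ▸ (by decide : '.' ∈ "creature_state.mood".toList))
    have e2 : path.toList ≠ "creature_state.stage".toList := by
      rw [hdec]; intro he
      exact hnodot (he ▸ (by decide : '.' ∈ "creature_state.stage".toList))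
    have hh : path.toList = (pvPart path.toList).1 := hdec
    simp only [p1, p2, p3, p4, e1, e2, ← hh]
    by_cases m1 : path.toList = ['m', 'o', 'o', 'd']
    · simp [m1]
    by_cases m2 : path.toList = ['n', 'e', 'e', 'd', 's']
    · simp [m2]
    by_cases m3 : path.toList = ['t', 'a', 'n', 'k']
    · simp [m3]
    by_cases m4 : path.toList = ['c', 'u', 'r', 'r', 'e', 'n', 't', '_', 's', 't', 'a', 'g', 'e']
    · simp [m4]
    · simp [m1, m2, m3, m4]
  · -- path = head ++ '.' :: tail
    rw [hd] at hdec; rw [if_pos rfl] at hdec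
    set h := (pvPart path.toList).1 with hhdef
    set t := (pvPart path.toList).2.2 with htdef
    have e1 : (path.toList = "mood".toList) ↔ False := by
      rw [hdec]; exact eq_nodot_iff h "mood".toList hnodot (by decide) t
    have e2 : (path.toList = "needs".toList) ↔ False := by
      rw [hdec]; exact eq_nodot_iff h "needs".toList hnodot (by decide) t
    have e3 : (path.toList = "tank".toList) ↔ False := by
      rw [hdec]; exact eq_nodot_iff h "tank".toList hnodot (by decide) t
    have e4 : (path.toList = "current_stage".toList) ↔ False := by
      rw [hdec]; exact eq_nodot_iff h "current_stage".toList hnodot (by decide) t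
    have e5 : (path.toList = "creature_state.mood".toList) ↔ (h = "creature_state".toList ∧ t = "mood".toList) := by
      rw [hdec]
      exact eq_dotted_iff h t "creature_state".toList "mood".toList hnodot (by decide)
    have e6 : (path.toList = "creature_state.stage".toList) ↔ (h = "creature_state".toList ∧ t = "stage".toList) := by
      rw [hdec]
      exact eq_dotted_iff h t "creature_state".toList "stage".toList hnodot (by decide)
    have s1 : ("needs.".toList <+: path.toList) ↔ h = "needs".toList := by
      rw [hdec]
      exact prefix_dotted_iff h t "needs".toList hnodot (by decide)
    have s2 : ("tank.".toList <+: path.toList) ↔ h = "tank".toList := by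
      rw [hdec]
      exact prefix_dotted_iff h t "tank".toList hnodot (by decide)
    have s3 : ("active_traits.".toList <+: path.toList) ↔ h = "active_traits".toList := by
      rw [hdec]
      exact prefix_dotted_iff h t "active_traits".toList hnodot (by decide)
    have s4 : ("creature_state.".toList <+: path.toList) ↔ h = "creature_state".toList := by
      rw [hdec]
      exact prefix_dotted_iff h t "creature_state".toList hnodot (by decide)
    simp only [e1, e2, e3, e4, e5, e6, s1, s2, s3, s4]
    by_cases c1 : h = ['n', 'e', 'e', 'd', 's']
    · simp [c1]
    by_cases c2 : h = ['t', 'a', 'n', 'k']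
    · simp [c2]
    by_cases c3 : h = ['c', 'r', 'e', 'a', 't', 'u', 'r', 'e', '_', 's', 't', 'a', 't', 'e']
    · by_cases t1 : t = ['m', 'o', 'o', 'd']
      · simp [c3, t1]
      by_cases t2 : t = ['s', 't', 'a', 'g', 'e']
      · simp [c3, t2]
      · simp [c3, t1, t2]
    by_cases c4 : h = ['a', 'c', 't', 'i', 'v', 'e', '_', 't', 'r', 'a', 'i', 't', 's']
    · simp [c4]
    · simp [c1, c2, c3, c4]

lemma pv_fold_eq (changed_fields : List String) (acc : List String) :
    changed_fields.foldl (fun channels path =>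
      if path == "mood" || path == "creature_state.mood" then
        PySem.Set.add channels "mood"
      else if PySem.Str.startswith path "needs." || path == "needs" then
        PySem.Set.add channels "needs"
      else if PySem.Str.startswith path "tank." || path == "tank" then
        PySem.Set.add channels "tank"
      else if path == "current_stage" || path == "creature_state.stage" then
        PySem.Set.add channels "evolution"
      else if PySem.Str.startswith path "active_traits." then
        PySem.Set.add channels "mood"
      else if PySem.Str.startswith path "creature_state." then
        PySem.Set.add channels "needs"
      else channels) acc
    = changed_fields.foldl (fun channels path =>
        match pvClassify path with
        | some c => PySem.Set.add channels c
        | none => channels) acc := by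
  induction changed_fields generalizing acc with
  | nil => rfl
  | cons p rest ih => rw [List.foldl_cons, List.foldl_cons, pv_step_eq]; exact ih _

-- ===== VERDICT (by name: the statement is the Claim_ definition above) =====
theorem diff_to_channels_spec : Claim_equal_diff_to_channels := by
  intro changed_fields _
  unfold Spec_diff_to_channels diff_to_channels diff_to_channels_alt
  exact pv_fold_eq changed_fields PySem.Set.empty
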